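-- pv_equiv track=rewrite | github.com/YNaglenko/Python_lvl_1 | Hw10/Home_work_10_3.py | calc_age_range
-- ===== SOURCE A (Python) =====
-- def calc_age_range(age, name):
--     if 0 <= age <= 500:
--         age_reference = {10: "дитячий вік", 25: "юний вік",
--                          44: "молодий вік", 60: "середній вік",
--                          75: "похилий вік", 90: "довгожитель"}
--         age_description = age_reference.get(90)
--         for key in age_reference.keys():
--             if age < key:
--                 age_description = age_reference.get(key)
--                 break
--             else:
--                 continue
--         msg = "{n} віком {a} - має {ad}".format(n=name, a=age, ad=age_description)
--     else:
--         msg = "Помилка у вказаному віці. Вік {a} не належить діапазону від 0 до 500".format(a=age)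
--     return msg
-- ===== SOURCE B (Python) =====
-- import bisect
--
-- _KEYS = [10, 25, 44, 60, 75, 90]
-- _LABELS = ["дитячий вік", "юний вік", "молодий вік",
--            "середній вік", "похилий вік", "довгожитель"]
--
--
-- def calc_age_range(age, name):
--     if 0 <= age <= 500:
--         idx = min(bisect.bisect_right(_KEYS, age), 5)
--         return "{n} віком {a} - має {ad}".format(n=name, a=age, ad=_LABELS[idx])
--     return "Помилка у вказаному віці. Вік {a} не належить діапазону від 0 до 500".format(a=age)
-- ===== Notes on version B (the rewrite author's own statement) =====
-- stated objective: idiomatic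
-- what changed: Replaced the early-exit linear scan over the dict keys (with a dict lookup per step) by a bisect_right binary search on a sorted key table with a clamped index into a parallel label list.
import Mathlib
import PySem

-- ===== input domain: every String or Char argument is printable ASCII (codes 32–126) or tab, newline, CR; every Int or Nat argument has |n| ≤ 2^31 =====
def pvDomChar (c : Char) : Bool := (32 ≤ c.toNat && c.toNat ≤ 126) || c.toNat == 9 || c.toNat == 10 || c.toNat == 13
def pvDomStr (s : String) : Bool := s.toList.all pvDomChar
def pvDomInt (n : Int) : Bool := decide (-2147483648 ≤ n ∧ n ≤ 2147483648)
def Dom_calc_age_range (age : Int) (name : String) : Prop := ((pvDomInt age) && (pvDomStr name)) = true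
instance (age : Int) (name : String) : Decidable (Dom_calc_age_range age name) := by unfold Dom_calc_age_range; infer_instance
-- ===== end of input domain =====

-- B replaces A's early-exit linear scan over the dict keys by a bisect_right binary
-- search on a sorted key table with a clamped index (objective: idiomatic/alternative).

-- ===== PORT A =====
-- the 'for key in age_reference.keys(): if age < key: … break' loop
def pvLoopA (age : Int) (d : PySem.Dict Int String) : List Int → Option String → Option String
  | [], acc => acc
  | k :: rest, acc => if age < k then d.get? k else pvLoopA age d rest acc

def calc_age_range (age : Int) (name : String) : String :=
  if 0 ≤ age ∧ age ≤ 500 then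
    let age_reference : PySem.Dict Int String :=
      PySem.Dict.ofList [(10, "дитячий вік"), (25, "юний вік"), (44, "молодий вік"),
                         (60, "середній вік"), (75, "похилий вік"), (90, "довгожитель")]
    let age_description := age_reference.get? 90
    let age_description := pvLoopA age age_reference age_reference.keys age_description
    name ++ " віком " ++ PySem.Int.toStr age ++ " - має " ++ (Option.getD age_description "None")
  else
    "Помилка у вказаному віці. Вік " ++ PySem.Int.toStr age ++ " не належить діапазону від 0 до 500"

-- ===== PORT B =====
def pvKeys : List Int := [10, 25, 44, 60, 75, 90]
def pvLabels : List String := ["дитячий вік", "юний вік", "молодий вік",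
                               "середній вік", "похилий вік", "довгожитель"]

-- transliteration of bisect.bisect_right's lo/hi loop
def pvBisectRight (xs : List Int) (x : Int) (lo hi : Nat) : Nat :=
  if h : lo < hi then
    let mid := (lo + hi) / 2
    if x < xs.getD mid 0 then pvBisectRight xs x lo mid
    else pvBisectRight xs x (mid + 1) hi
  else lo
termination_by hi - lo
decreasing_by all_goals omega

def calc_age_range_alt (age : Int) (name : String) : String :=
  if 0 ≤ age ∧ age ≤ 500 then
    let idx := min (pvBisectRight pvKeys age 0 pvKeys.length) 5
    name ++ " віком " ++ PySem.Int.toStr age ++ " - має " ++ pvLabels.getD idx ""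
  else
    "Помилка у вказаному віці. Вік " ++ PySem.Int.toStr age ++ " не належить діапазону від 0 до 500"

-- ===== PRECONDITION & SPEC =====
def Spec_calc_age_range (age : Int) (name : String) (out : String) : Prop := out = calc_age_range_alt age name
instance (age : Int) (name : String) (out : String) : Decidable (Spec_calc_age_range age name out) := by unfold Spec_calc_age_range; infer_instance

-- ===== CLAIM (what is proved, stated in full; the proofs are below) =====
def Claim_equal_calc_age_range : Prop := ∀ (age : Int) (name : String), Dom_calc_age_range age name → Spec_calc_age_range age name (calc_age_range age name)

-- ===== LEMMAS AND PROOFS =====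

-- ===== VERDICT (by name: the statement is the Claim_ definition above) =====
theorem calc_age_range_spec : Claim_equal_calc_age_range := by
  intro age name _
  unfold Spec_calc_age_range calc_age_range calc_age_range_alt
  by_cases h : 0 ≤ age ∧ age ≤ 500
  · rw [if_pos h, if_pos h]
    have hd : (PySem.Dict.ofList [(10, "дитячий вік"), (25, "юний вік"), (44, "молодий вік"),
                 (60, "середній вік"), (75, "похилий вік"), (90, "довгожитель")] : PySem.Dict Int String)
        = PySem.Dict.mk [(10, "дитячий вік"), (25, "юний вік"), (44, "молодий вік"),
                 (60, "середній вік"), (75, "похилий вік"), (90, "довгожитель")] := by rfl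
    by_cases a10 : age < (10:Int)
    · have a25 : age < (25:Int) := by omega
      have a60 : age < (60:Int) := by omega
      simp [pvBisectRight, pvKeys, pvLabels, pvLoopA, hd, PySem.Dict.keys_mk, PySem.Dict.get?_mk_cons, a10, a25, a60]
    · by_cases a25 : age < (25:Int)
      · have a10 : ¬ age < (10:Int) := by omega
        have a60 : age < (60:Int) := by omega
        simp [pvBisectRight, pvKeys, pvLabels, pvLoopA, hd, PySem.Dict.keys_mk, PySem.Dict.get?_mk_cons, a10, a25, a60]
      · by_cases a44 : age < (44:Int)
        · have a10 : ¬ age < (10:Int) := by omega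
          have a25 : ¬ age < (25:Int) := by omega
          have a60 : age < (60:Int) := by omega
          simp [pvBisectRight, pvKeys, pvLabels, pvLoopA, hd, PySem.Dict.keys_mk, PySem.Dict.get?_mk_cons, a10, a25, a44, a60]
        · by_cases a60 : age < (60:Int)
          · have a10 : ¬ age < (10:Int) := by omega
            have a25 : ¬ age < (25:Int) := by omega
            have a44 : ¬ age < (44:Int) := by omega
            simp [pvBisectRight, pvKeys, pvLabels, pvLoopA, hd, PySem.Dict.keys_mk, PySem.Dict.get?_mk_cons, a10, a25, a44, a60]
          · by_cases a75 : age < (75:Int)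
            · have a10 : ¬ age < (10:Int) := by omega
              have a25 : ¬ age < (25:Int) := by omega
              have a44 : ¬ age < (44:Int) := by omega
              have a60 : ¬ age < (60:Int) := by omega
              have a90 : age < (90:Int) := by omega
              simp [pvBisectRight, pvKeys, pvLabels, pvLoopA, hd, PySem.Dict.keys_mk, PySem.Dict.get?_mk_cons, a10, a25, a44, a60, a75, a90]
            · by_cases a90 : age < (90:Int)
              · have a10 : ¬ age < (10:Int) := by omega
                have a25 : ¬ age < (25:Int) := by omega
                have a44 : ¬ age < (44:Int) := by omega
                have a60 : ¬ age < (60:Int) := by omega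
                have a75 : ¬ age < (75:Int) := by omega
                simp [pvBisectRight, pvKeys, pvLabels, pvLoopA, hd, PySem.Dict.keys_mk, PySem.Dict.get?_mk_cons, a10, a25, a44, a60, a75, a90]
              · have a10 : ¬ age < (10:Int) := by omega
                have a25 : ¬ age < (25:Int) := by omega
                have a44 : ¬ age < (44:Int) := by omega
                have a60 : ¬ age < (60:Int) := by omega
                have a75 : ¬ age < (75:Int) := by omega
                simp [pvBisectRight, pvKeys, pvLabels, pvLoopA, hd, PySem.Dict.keys_mk, PySem.Dict.get?_mk_cons, a10, a25, a44, a60, a75, a90]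
  · rw [if_neg h, if_neg h]
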